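-- pv_equiv track=rewrite | github.com/montipls/ish_renderer | renderer.py | blit_sprite
-- ===== SOURCE A (Python) =====
-- def blit_sprite(surface: list[list[int]], sprite: list[list[int]], x: int, y: int) -> list[list[int]]:
--     result = surface[:]
--     H = len(surface)
--     W = len(surface[0])
--     sh = len(sprite)
--     sw = len(sprite[0])
--
--     valid_sy_start = max(0, -y)
--     valid_sy_end = min(sh, H - y)
--     valid_sx_start = max(0, -x)
--     valid_sx_end = min(sw, W - x)
--
--     copied = [False] * H
--
--     for sy in range(valid_sy_start, valid_sy_end):
--         py = y + sy
--         if not copied[py]: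
--             result[py] = surface[py][:]
--             copied[py] = True
--         row = result[py]
--         sprite_row = sprite[sy]
--         for sx in range(valid_sx_start, valid_sx_end):
--             px = x + sx
--             pixel = sprite_row[sx]
--             if pixel and row[px] != pixel:
--                 row[px] = pixel
--
--     return result
-- ===== SOURCE B (Python) =====
-- def blit_sprite(surface: list[list[int]], sprite: list[list[int]], x: int, y: int) -> list[list[int]]:
--     H = len(surface)
--     W = len(surface[0])
--     sh = len(sprite)
--     sw = len(sprite[0])
--
--     sy0 = max(0, -y)
--     sy1 = min(sh, H - y)
--     sx0 = max(0, -x)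
--     sx1 = min(sw, W - x)
--
--     out = []
--     for py, row in enumerate(surface):
--         sy = py - y
--         if sy0 <= sy < sy1:
--             sprite_row = sprite[sy]
--             out.append([
--                 sprite_row[px - x]
--                 if sx0 <= px - x < sx1 and sprite_row[px - x]
--                 else v
--                 for px, v in enumerate(row)
--             ])
--         else:
--             out.append(row)
--     return out
-- ===== Notes on version B (the rewrite author's own statement) =====
-- stated objective: alternative
-- what changed: B is a gather (pull) rebuild: each output pixel is computed by an index lookup back into the sprite (per-pixel comprehension over each overlapped row), instead of A's scatter that shallow-copies the surface and writes sprite pixels into copied rows via index assignments guarded by a `copied` flag array and a skip-if-equal check.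
-- outside the precondition, e.g. on blit_sprite([], [[1]], 0, 0): A raises IndexError, B raises IndexError
import Mathlib
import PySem

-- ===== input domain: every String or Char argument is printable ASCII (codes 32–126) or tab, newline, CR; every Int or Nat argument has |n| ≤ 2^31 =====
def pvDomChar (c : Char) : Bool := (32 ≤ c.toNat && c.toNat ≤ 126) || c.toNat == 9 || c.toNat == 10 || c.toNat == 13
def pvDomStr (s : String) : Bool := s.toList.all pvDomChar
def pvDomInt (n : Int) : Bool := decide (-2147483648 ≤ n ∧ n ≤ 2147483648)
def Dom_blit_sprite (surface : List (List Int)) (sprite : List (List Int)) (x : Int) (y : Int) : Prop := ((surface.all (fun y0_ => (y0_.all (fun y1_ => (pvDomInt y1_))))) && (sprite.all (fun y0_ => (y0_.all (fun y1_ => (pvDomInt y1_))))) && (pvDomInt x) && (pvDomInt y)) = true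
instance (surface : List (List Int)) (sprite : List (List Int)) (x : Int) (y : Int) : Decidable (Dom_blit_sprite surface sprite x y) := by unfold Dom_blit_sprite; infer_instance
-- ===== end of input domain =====

-- B is a gather (pull) rebuild: each output pixel of an overlapped row is computed by a lookup
-- back into the sprite (per-pixel comprehension), instead of A's scatter of sprite pixels into
-- shallow-copied rows guarded by a `copied` flag array; objective: alternative, same order of cost.
-- Neither version mutates its arguments; the equivalence is about the returned value.

-- ===== PORT A =====
def blit_sprite (surface : List (List Int)) (sprite : List (List Int)) (x : Int) (y : Int) : List (List Int) :=
  let result := PySem.List.slice surface none none        -- result = surface[:]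
  let H : Int := surface.length
  let W : Int := (surface.headI).length                   -- len(surface[0]); Pre_ demands surface ≠ []
  let sh : Int := sprite.length
  let sw : Int := (sprite.headI).length                   -- len(sprite[0]); Pre_ demands sprite ≠ []
  let vys := max 0 (-y)
  let vye := min sh (H - y)
  let vxs := max 0 (-x)
  let vxe := min sw (W - x)
  let copied := List.replicate surface.length false
  let st := (PySem.List.pyRange vys vye 1).foldl (fun (st : List (List Int) × List Bool) sy =>
    let py := y + sy
    let p := if !(st.2.getD py.toNat false) then
        (st.1.set py.toNat (PySem.List.slice (surface.getD py.toNat []) none none), st.2.set py.toNat true)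
      else (st.1, st.2)
    let row := p.1.getD py.toNat []                       -- row/result[py] accesses: in range under Pre_
    let sprite_row := sprite.getD sy.toNat []
    let row := (PySem.List.pyRange vxs vxe 1).foldl (fun (row : List Int) sx =>
        let px := x + sx
        let pixel := sprite_row.getD sx.toNat 0
        if pixel ≠ 0 ∧ row.getD px.toNat 0 ≠ pixel then row.set px.toNat pixel else row) row
    (p.1.set py.toNat row, p.2)) (result, copied)
  st.1

-- ===== PORT B =====
def blit_sprite_alt (surface : List (List Int)) (sprite : List (List Int)) (x : Int) (y : Int) : List (List Int) :=
  let H : Int := surface.length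
  let W : Int := (surface.headI).length
  let sh : Int := sprite.length
  let sw : Int := (sprite.headI).length
  let sy0 := max 0 (-y)
  let sy1 := min sh (H - y)
  let sx0 := max 0 (-x)
  let sx1 := min sw (W - x)
  (PySem.List.enumerate surface 0).foldl (fun out pr =>
    let sy := pr.1 - y
    if sy0 ≤ sy ∧ sy < sy1 then
      let sprite_row := sprite.getD sy.toNat []
      out ++ [(PySem.List.enumerate pr.2 0).map (fun q =>
        if (sx0 ≤ q.1 - x ∧ q.1 - x < sx1) ∧ sprite_row.getD (q.1 - x).toNat 0 ≠ 0
        then sprite_row.getD (q.1 - x).toNat 0 else q.2)]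
    else out ++ [pr.2]) []

-- ===== PRECONDITION & SPEC =====
-- Pre_ excludes exactly the inputs where A raises IndexError: an empty surface or sprite
-- (surface[0]/sprite[0]), a sprite row too short for the x-overlap band, or a surface row in the
-- blit region too short for a non-zero pixel's target column.
def Pre_blit_sprite (surface : List (List Int)) (sprite : List (List Int)) (x : Int) (y : Int) : Prop :=
  surface ≠ [] ∧ sprite ≠ [] ∧
  ∀ sy ∈ PySem.List.pyRange (max 0 (-y)) (min (sprite.length : Int) ((surface.length : Int) - y)) 1,
    ∀ sx ∈ PySem.List.pyRange (max 0 (-x)) (min ((sprite.headI).length : Int) (((surface.headI).length : Int) - x)) 1,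
      sx < ((sprite.getD sy.toNat []).length : Int) ∧
      ((sprite.getD sy.toNat []).getD sx.toNat 0 ≠ 0 →
        x + sx < ((surface.getD (y + sy).toNat []).length : Int))
instance (surface : List (List Int)) (sprite : List (List Int)) (x : Int) (y : Int) : Decidable (Pre_blit_sprite surface sprite x y) := by unfold Pre_blit_sprite; infer_instance

def pvWitness_blit_sprite : List (List Int) × List (List Int) × Int × Int :=
  ([[0, 0], [0, 0]], [[7]], 0, 1)

def Spec_blit_sprite (surface : List (List Int)) (sprite : List (List Int)) (x : Int) (y : Int) (out : List (List Int)) : Prop := out = blit_sprite_alt surface sprite x y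
instance (surface : List (List Int)) (sprite : List (List Int)) (x : Int) (y : Int) (out : List (List Int)) : Decidable (Spec_blit_sprite surface sprite x y out) := by unfold Spec_blit_sprite; infer_instance

-- ===== CLAIM (what is proved, stated in full; the proofs are below) =====
def Claim_equal_blit_sprite : Prop := ∀ (surface : List (List Int)) (sprite : List (List Int)) (x : Int) (y : Int), Dom_blit_sprite surface sprite x y → Pre_blit_sprite surface sprite x y → Spec_blit_sprite surface sprite x y (blit_sprite surface sprite x y)

-- ===== LEMMAS AND PROOFS =====

-- A's loop body, named (definitionally equal to the lambda inside blit_sprite).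
def pvAStep (surface sprite : List (List Int)) (x y vxs vxe : Int)
    (st : List (List Int) × List Bool) (sy : Int) : List (List Int) × List Bool :=
  let py := y + sy
  let p := if !(st.2.getD py.toNat false) then
      (st.1.set py.toNat (PySem.List.slice (surface.getD py.toNat []) none none), st.2.set py.toNat true)
    else (st.1, st.2)
  let row := p.1.getD py.toNat []
  let sprite_row := sprite.getD sy.toNat []
  let row := (PySem.List.pyRange vxs vxe 1).foldl (fun (row : List Int) sx =>
      let px := x + sx
      let pixel := sprite_row.getD sx.toNat 0
      if pixel ≠ 0 ∧ row.getD px.toNat 0 ≠ pixel then row.set px.toNat pixel else row) row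
  (p.1.set py.toNat row, p.2)

-- B's loop body, named (definitionally equal to the lambda inside blit_sprite_alt).
def pvBStep (sprite : List (List Int)) (x y sy0 sy1 sx0 sx1 : Int)
    (out : List (List Int)) (pr : Int × List Int) : List (List Int) :=
  let sy := pr.1 - y
  if sy0 ≤ sy ∧ sy < sy1 then
    let sprite_row := sprite.getD sy.toNat []
    out ++ [(PySem.List.enumerate pr.2 0).map (fun q =>
      if (sx0 ≤ q.1 - x ∧ q.1 - x < sx1) ∧ sprite_row.getD (q.1 - x).toNat 0 ≠ 0
      then sprite_row.getD (q.1 - x).toNat 0 else q.2)]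
  else out ++ [pr.2]

-- B's per-row gather.
def pvGatherRow (sprite_row : List Int) (x sx0 sx1 : Int) (row : List Int) : List Int :=
  (PySem.List.enumerate row 0).map (fun q =>
    if (sx0 ≤ q.1 - x ∧ q.1 - x < sx1) ∧ sprite_row.getD (q.1 - x).toNat 0 ≠ 0
    then sprite_row.getD (q.1 - x).toNat 0 else q.2)

-- A's row overlay (skip the write when the pixel is already there).
def pvOverlayA (sprite_row : List Int) (x sx0 sx1 : Int) (row : List Int) : List Int :=
  (PySem.List.pyRange sx0 sx1 1).foldl (fun (row : List Int) (sx : Int) =>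
      let px := x + sx
      let pixel := sprite_row.getD sx.toNat 0
      if pixel ≠ 0 ∧ row.getD px.toNat 0 ≠ pixel then row.set px.toNat pixel else row) row

-- intermediate: the overlay with the skip-if-equal check removed.
def pvOverlayB (sprite_row : List Int) (x sx0 sx1 : Int) (row : List Int) : List Int :=
  (PySem.List.pyRange sx0 sx1 1).foldl (fun (r : List Int) (sx : Int) =>
      let pixel := sprite_row.getD sx.toNat 0
      if pixel ≠ 0 then r.set (x + sx).toNat pixel else r) row

-- the two overlay steps agree: writing an already-present pixel is a no-op.
lemma pvInnerStep_eq (sprite_row : List Int) (x : Int) :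
    (fun (row : List Int) (sx : Int) =>
        let px := x + sx
        let pixel := sprite_row.getD sx.toNat 0
        if pixel ≠ 0 ∧ row.getD px.toNat 0 ≠ pixel then row.set px.toNat pixel else row)
      = (fun (r : List Int) (sx : Int) =>
        let pixel := sprite_row.getD sx.toNat 0
        if pixel ≠ 0 then r.set (x + sx).toNat pixel else r) := by
  funext r sx
  show (if sprite_row.getD sx.toNat 0 ≠ 0 ∧ r.getD (x + sx).toNat 0 ≠ sprite_row.getD sx.toNat 0
      then r.set (x + sx).toNat (sprite_row.getD sx.toNat 0) else r)
    = (if sprite_row.getD sx.toNat 0 ≠ 0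
      then r.set (x + sx).toNat (sprite_row.getD sx.toNat 0) else r)
  by_cases h0 : sprite_row.getD sx.toNat 0 = 0
  · rw [if_neg (fun h => h.1 h0), if_neg (fun h => h h0)]
  · by_cases h1 : r.getD (x + sx).toNat 0 = sprite_row.getD sx.toNat 0
    · rw [if_neg (fun h => h.2.elim h1), if_pos h0]
      by_cases hlt : (x + sx).toNat < r.length
      · refine (List.ext_getElem (by simp) ?_).symm
        intro i hi _
        rw [List.getElem_set]
        split
        · next he => subst he; rw [← h1]; simp [List.getD, List.getElem?_eq_getElem hlt]
        · rfl
      · exact (List.set_eq_of_length_le (by omega)).symm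
    · rw [if_pos ⟨h0, h1⟩, if_pos h0]

lemma pvOverlay_eq (sprite_row : List Int) (x sx0 sx1 : Int) (row : List Int) :
    pvOverlayA sprite_row x sx0 sx1 row = pvOverlayB sprite_row x sx0 sx1 row := by
  unfold pvOverlayA pvOverlayB
  rw [pvInnerStep_eq]

lemma pvOverlayB_length (sprite_row : List Int) (x : Int) (rng : List Int) (row : List Int) :
    (rng.foldl (fun (r : List Int) (sx : Int) =>
      let pixel := sprite_row.getD sx.toNat 0
      if pixel ≠ 0 then r.set (x + sx).toNat pixel else r) row).length = row.length := by
  induction rng generalizing row with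
  | nil => rfl
  | cons a t ih => simp only [List.foldl_cons]; rw [ih]; split <;> simp

-- getD characterisation of the scatter overlay: it IS the gather of each position.
lemma pvOverlayB_getD (sprite_row : List Int) (x : Int) (px : Nat) :
    ∀ (n : Nat) (a b : Int), (b - a).toNat = n → 0 ≤ x + a →
      ∀ (row : List Int), px < row.length →
      (pvOverlayB sprite_row x a b row).getD px 0
        = if (a ≤ (px : Int) - x ∧ (px : Int) - x < b) ∧
              sprite_row.getD ((px : Int) - x).toNat 0 ≠ 0
          then sprite_row.getD ((px : Int) - x).toNat 0 else row.getD px 0 := by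
  intro n
  induction n with
  | zero =>
    intro a b hn _ row _
    unfold pvOverlayB
    rw [PySem.List.pyRange_one_eq_nil (by omega), List.foldl_nil, if_neg (by omega)]
  | succ n ih =>
    intro a b hn hxa row hpx
    unfold pvOverlayB
    rw [show b = (b - 1) + 1 by ring, PySem.List.pyRange_one_succ_right (show a ≤ b - 1 by omega)]
    rw [List.foldl_append, List.foldl_cons, List.foldl_nil]
    have hpre : List.foldl (fun (r : List Int) (sx : Int) =>
        let pixel := sprite_row.getD sx.toNat 0
        if pixel ≠ 0 then r.set (x + sx).toNat pixel else r) row (PySem.List.pyRange a (b - 1) 1)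
        = pvOverlayB sprite_row x a (b - 1) row := rfl
    rw [hpre]
    have hlen : (pvOverlayB sprite_row x a (b - 1) row).length = row.length :=
      pvOverlayB_length sprite_row x _ row
    have hih := ih a (b - 1) (by omega) hxa row hpx
    show (if sprite_row.getD (b - 1).toNat 0 ≠ 0
        then (pvOverlayB sprite_row x a (b - 1) row).set (x + (b - 1)).toNat
              (sprite_row.getD (b - 1).toNat 0)
        else pvOverlayB sprite_row x a (b - 1) row).getD px 0 = _
    by_cases hlast : (px : Int) = x + (b - 1)
    · have hsx : ((px : Int) - x).toNat = (b - 1).toNat := by omega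
      by_cases hz : sprite_row.getD (b - 1).toNat 0 = 0
      · rw [if_neg (fun h => h hz), hih]
        rw [hsx]
        by_cases hc : (a ≤ (px : Int) - x ∧ (px : Int) - x < b - 1) ∧
            sprite_row.getD (b - 1).toNat 0 ≠ 0
        · exact absurd hz hc.2
        · rw [if_neg hc, if_neg (fun h => h.2 hz)]
      · rw [if_pos hz]
        have hset : (x + (b - 1)).toNat = px := by omega
        rw [hset, List.getD, List.getElem?_set_self (by rw [hlen]; exact hpx)]
        rw [if_pos ⟨⟨by omega, by omega⟩, by rw [hsx]; exact hz⟩]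
        rw [hsx]
        rfl
    · have hne : (x + (b - 1)).toNat ≠ px := by omega
      have hstep : ∀ (r : List Int),
          (if sprite_row.getD (b - 1).toNat 0 ≠ 0
            then r.set (x + (b - 1)).toNat (sprite_row.getD (b - 1).toNat 0) else r).getD px 0
            = r.getD px 0 := by
        intro r
        split
        · simp [List.getD, List.getElem?_set_ne hne]
        · rfl
      rw [hstep, hih]
      by_cases hc : (a ≤ (px : Int) - x ∧ (px : Int) - x < b - 1) ∧
          sprite_row.getD ((px : Int) - x).toNat 0 ≠ 0
      · rw [if_pos hc, if_pos ⟨⟨hc.1.1, by omega⟩, hc.2⟩]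
      · rw [if_neg hc, if_neg (by
          intro h
          exact hc ⟨⟨h.1.1, by omega⟩, h.2⟩)]

-- the scatter overlay equals B's gather row.
lemma pvOverlay_gather (sprite_row : List Int) (x sx0 sx1 : Int) (hx : 0 ≤ x + sx0)
    (row : List Int) :
    pvOverlayB sprite_row x sx0 sx1 row = pvGatherRow sprite_row x sx0 sx1 row := by
  apply List.ext_getElem
  · unfold pvOverlayB pvGatherRow
    rw [pvOverlayB_length]
    simp [PySem.List.length_enumerate]
  · intro px h1 h2
    have hpx : px < row.length := by
      have := pvOverlayB_length sprite_row x (PySem.List.pyRange sx0 sx1 1) row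
      unfold pvOverlayB at h1
      omega
    have hL : ∀ {l : List Int} (hjl : px < l.length), l[px] = l.getD px 0 := by
      intro l hjl; simp [List.getD, List.getElem?_eq_getElem hjl]
    rw [hL h1, pvOverlayB_getD sprite_row x px _ sx0 sx1 rfl hx row hpx]
    unfold pvGatherRow
    rw [List.getElem_map, PySem.List.getElem_enumerate]
    simp only [zero_add]
    rw [hL hpx]

-- A's pure outer loop, after eliminating the `copied` array.
def pvAPure (surface sprite : List (List Int)) (x y vxs vxe : Int) (rng : List Int)
    (res : List (List Int)) : List (List Int) :=
  rng.foldl (fun res sy =>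
    res.set (y + sy).toNat
      (pvOverlayA (sprite.getD sy.toNat []) x vxs vxe (surface.getD (y + sy).toNat []))) res

lemma pvAPure_length (surface sprite : List (List Int)) (x y vxs vxe : Int) (rng : List Int)
    (res : List (List Int)) : (pvAPure surface sprite x y vxs vxe rng res).length = res.length := by
  induction rng generalizing res with
  | nil => rfl
  | cons a t ih => simp [pvAPure] at ih ⊢; rw [ih]; simp

lemma pvGetD_set_self (r : List (List Int)) (n : Nat) (v : List Int) (h : n < r.length) :
    (r.set n v).getD n [] = v := by
  simp [List.getD, h]

lemma pvGetD_set_ne (r : List (List Int)) (n m : Nat) (v : List Int) (h : n ≠ m) :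
    (r.set n v).getD m [] = r.getD m [] := by
  simp [List.getD, List.getElem?_set_ne h]

lemma pvGetD_set_ne' (r : List Bool) (n m : Nat) (v : Bool) (h : n ≠ m) :
    (r.set n v).getD m false = r.getD m false := by
  simp [List.getD, List.getElem?_set_ne h]

-- one iteration of A's stateful loop, on a row not yet copied and not yet modified.
lemma pvAStep_eval (surface sprite : List (List Int)) (x y vxs vxe a : Int)
    (res : List (List Int)) (cop : List Bool)
    (hc : cop.getD (y + a).toNat false = false)
    (hr : res.getD (y + a).toNat [] = surface.getD (y + a).toNat []) :
    pvAStep surface sprite x y vxs vxe (res, cop) a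
      = (res.set (y + a).toNat
          (pvOverlayA (sprite.getD a.toNat []) x vxs vxe (surface.getD (y + a).toNat [])),
        cop.set (y + a).toNat true) := by
  have hrow : ((res.set (y + a).toNat (surface.getD (y + a).toNat [])).getD (y + a).toNat [])
      = surface.getD (y + a).toNat [] := by
    by_cases hlt : (y + a).toNat < res.length
    · exact pvGetD_set_self _ _ _ hlt
    · rw [List.set_eq_of_length_le (by omega)]; exact hr
  unfold pvAStep pvOverlayA
  simp only [hc, Bool.not_false, if_true, PySem.List.slice_none_none]
  rw [hrow, List.set_set]

-- A's stateful loop equals the pure loop, as long as every row in the remaining range is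
-- still uncopied and unmodified.
lemma pvA_loop (surface sprite : List (List Int)) (x y vxs vxe : Int) :
    ∀ (n : Nat) (a b : Int), (b - a).toNat = n →
      ∀ (res : List (List Int)) (cop : List Bool),
      0 ≤ y + a →
      res.length = surface.length →
      (∀ sy : Int, a ≤ sy → sy < b → cop.getD (y + sy).toNat false = false) →
      (∀ sy : Int, a ≤ sy → sy < b → res.getD (y + sy).toNat [] = surface.getD (y + sy).toNat []) →
      ((PySem.List.pyRange a b 1).foldl (pvAStep surface sprite x y vxs vxe) (res, cop)).1
        = pvAPure surface sprite x y vxs vxe (PySem.List.pyRange a b 1) res := by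
  intro n
  induction n with
  | zero =>
    intro a b hn res cop _ _ _ _
    rw [PySem.List.pyRange_one_eq_nil (by omega)]
    rfl
  | succ n ih =>
    intro a b hn res cop hya hlen hcop hres
    rw [PySem.List.pyRange_one_cons (by omega)]
    simp only [List.foldl_cons, pvAPure]
    have hc : cop.getD (y + a).toNat false = false := hcop a (le_refl a) (by omega)
    have hr : res.getD (y + a).toNat [] = surface.getD (y + a).toNat [] :=
      hres a (le_refl a) (by omega)
    rw [pvAStep_eval surface sprite x y vxs vxe a res cop hc hr]
    rw [ih (a + 1) b (by omega) _ _ (by omega) (by simp [hlen]) ?_ ?_]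
    · rfl
    · intro sy h1 h2
      rw [pvGetD_set_ne' _ _ _ _ (by
        intro he
        have h0' : (0 : Int) ≤ y + sy := by omega
        omega)]
      exact hcop sy (by omega) h2
    · intro sy h1 h2
      rw [pvGetD_set_ne _ _ _ _ (by
        intro he
        have h0' : (0 : Int) ≤ y + sy := by omega
        omega)]
      exact hres sy (by omega) h2

-- getD characterisation of the pure loop.
lemma pvAPure_getD (surface sprite : List (List Int)) (x y vxs vxe : Int) (j : Nat) :
    ∀ (n : Nat) (a b : Int), (b - a).toNat = n →
      ∀ (res : List (List Int)),
      0 ≤ y + a → j < res.length →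
      (pvAPure surface sprite x y vxs vxe (PySem.List.pyRange a b 1) res).getD j []
        = if a ≤ (j : Int) - y ∧ (j : Int) - y < b then
            pvOverlayA (sprite.getD ((j : Int) - y).toNat []) x vxs vxe (surface.getD j [])
          else res.getD j [] := by
  intro n
  induction n with
  | zero =>
    intro a b hn res _ _
    rw [PySem.List.pyRange_one_eq_nil (by omega)]
    simp only [pvAPure, List.foldl_nil]
    rw [if_neg (by omega)]
  | succ n ih =>
    intro a b hn res hya hj
    rw [show b = (b - 1) + 1 by ring]
    rw [PySem.List.pyRange_one_succ_right (show a ≤ b - 1 by omega)]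
    simp only [pvAPure, List.foldl_append, List.foldl_cons, List.foldl_nil]
    have hfold : (List.foldl (fun res sy =>
        res.set (y + sy).toNat
          (pvOverlayA (sprite.getD sy.toNat []) x vxs vxe (surface.getD (y + sy).toNat [])))
        res (PySem.List.pyRange a (b - 1) 1))
        = pvAPure surface sprite x y vxs vxe (PySem.List.pyRange a (b - 1) 1) res := rfl
    rw [hfold]
    by_cases he : (j : Int) = y + (b - 1)
    · have hj' : ((y + (b - 1)).toNat) = j := by omega
      rw [hj']
      rw [pvGetD_set_self _ _ _ (by rw [pvAPure_length]; exact hj)]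
      rw [if_pos (by omega)]
      congr 2
      omega
    · rw [pvGetD_set_ne _ _ _ _ (by intro hne; omega)]
      rw [ih a (b - 1) (by omega) res hya hj]
      by_cases hcond : a ≤ (j : Int) - y ∧ (j : Int) - y < b - 1
      · rw [if_pos hcond, if_pos (by omega)]
      · rw [if_neg hcond, if_neg (by omega)]

-- B's loop builds the map of its per-row function over the enumeration.
lemma pvB_foldl (sprite : List (List Int)) (x y sy0 sy1 sx0 sx1 : Int) :
    ∀ (l : List (Int × List Int)) (acc : List (List Int)),
      l.foldl (pvBStep sprite x y sy0 sy1 sx0 sx1) acc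
        = acc ++ l.map (fun pr =>
            if sy0 ≤ pr.1 - y ∧ pr.1 - y < sy1 then
              pvGatherRow (sprite.getD (pr.1 - y).toNat []) x sx0 sx1 pr.2
            else pr.2) := by
  intro l
  induction l with
  | nil => intro acc; simp
  | cons p t ih =>
    intro acc
    rw [List.foldl_cons, List.map_cons, ih]
    have hstep : pvBStep sprite x y sy0 sy1 sx0 sx1 acc p
        = acc ++ [if sy0 ≤ p.1 - y ∧ p.1 - y < sy1 then
            pvGatherRow (sprite.getD (p.1 - y).toNat []) x sx0 sx1 p.2 else p.2] := by
      simp only [pvBStep, pvGatherRow]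
      split <;> rfl
    rw [hstep, List.append_assoc]
    rfl

-- ===== VERDICT (by name: the statement is the Claim_ definition above) =====
theorem blit_sprite_spec : Claim_equal_blit_sprite := by
  intro surface sprite x y _ _
  unfold Spec_blit_sprite
  have hA : blit_sprite surface sprite x y
      = pvAPure surface sprite x y (max 0 (-x))
          (min ((sprite.headI).length : Int) (((surface.headI).length : Int) - x))
          (PySem.List.pyRange (max 0 (-y)) (min (sprite.length : Int) ((surface.length : Int) - y)) 1)
          surface := by
    show ((PySem.List.pyRange (max 0 (-y)) (min (sprite.length : Int) ((surface.length : Int) - y)) 1).foldl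
        (pvAStep surface sprite x y (max 0 (-x))
          (min ((sprite.headI).length : Int) (((surface.headI).length : Int) - x)))
        (PySem.List.slice surface none none, List.replicate surface.length false)).1 = _
    rw [PySem.List.slice_none_none]
    exact pvA_loop surface sprite x y _ _ _ _ _ rfl surface _
      (by omega) rfl
      (by intro sy _ _
          simp [List.getD, List.getElem?_replicate]
          split <;> simp)
      (by intro _ _ _; rfl)
  have hB : blit_sprite_alt surface sprite x y
      = (PySem.List.enumerate surface 0).map (fun pr =>
          if max 0 (-y) ≤ pr.1 - y ∧ pr.1 - y < min (sprite.length : Int) ((surface.length : Int) - y) then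
            pvGatherRow (sprite.getD (pr.1 - y).toNat []) x (max 0 (-x))
              (min ((sprite.headI).length : Int) (((surface.headI).length : Int) - x)) pr.2
          else pr.2) := by
    show (PySem.List.enumerate surface 0).foldl
        (pvBStep sprite x y (max 0 (-y)) (min (sprite.length : Int) ((surface.length : Int) - y))
          (max 0 (-x)) (min ((sprite.headI).length : Int) (((surface.headI).length : Int) - x))) [] = _
    rw [pvB_foldl]
    rfl
  rw [hA, hB]
  apply List.ext_getElem
  · rw [pvAPure_length]
    simp [PySem.List.length_enumerate]
  · intro j h1 h2
    have hjs : j < surface.length := by rw [pvAPure_length] at h1; exact h1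
    have hL : ∀ {l : List (List Int)} (hjl : j < l.length), l[j] = l.getD j [] := by
      intro l hjl; simp [List.getD, List.getElem?_eq_getElem hjl]
    rw [hL h1]
    rw [pvAPure_getD surface sprite x y _ _ j _ _ _ rfl surface (by omega) hjs]
    rw [List.getElem_map, PySem.List.getElem_enumerate]
    simp only [zero_add]
    by_cases hcond : max 0 (-y) ≤ (j : Int) - y ∧
        (j : Int) - y < min (sprite.length : Int) ((surface.length : Int) - y)
    · rw [if_pos hcond, if_pos hcond, pvOverlay_eq,
        pvOverlay_gather _ _ _ _ (by omega), hL hjs]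
    · rw [if_neg hcond, if_neg hcond, hL hjs]
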